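-- pv_equiv track=rewrite | github.com/zazabap/problem-reductions | docs/paper/verify-reductions/adversary_exact_cover_by_3_sets_acyclic_partition.py | adv_eval_x3c
-- ===== SOURCE A (Python) =====
-- def adv_eval_x3c(universe_size: int, subsets: list[list[int]], config: list[int]) -> bool:
--     """Evaluate X3C solution."""
--     q = universe_size // 3
--     selected = [i for i, v in enumerate(config) if v == 1]
--     if len(selected) != q:
--         return False
--     covered = set()
--     for idx in selected:
--         s = set(subsets[idx])
--         if s & covered:
--             return False
--         covered |= s
--     return covered == set(range(universe_size))
-- ===== SOURCE B (Python) =====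
-- def adv_eval_x3c(universe_size: int, subsets: list[list[int]], config: list[int]) -> bool:
--     """Evaluate X3C solution (element-centric: every universe point covered exactly once)."""
--     if sum(1 for v in config if v == 1) != universe_size // 3:
--         return False
--     chosen = [set(s) for s, v in zip(subsets, config) if v == 1]
--     if any(e < 0 or e >= universe_size for s in chosen for e in s):
--         return False
--     return all(sum(e in s for s in chosen) == 1 for e in range(universe_size))
-- ===== Notes on version B (the rewrite author's own statement) =====
-- stated objective: alternative
-- what changed: Replaces A's incremental covered-set accumulation with early exit on overlap by an element-centric check: pair subsets with config by zip, then verify every element is in range and every universe point is contained in exactly one chosen subset.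
-- outside the precondition, e.g. on adv_eval_x3c(9, [[0, 1, 2], [0, 3, 4]], [1, 1, 1]): A returns False, B returns False
import Mathlib
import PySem

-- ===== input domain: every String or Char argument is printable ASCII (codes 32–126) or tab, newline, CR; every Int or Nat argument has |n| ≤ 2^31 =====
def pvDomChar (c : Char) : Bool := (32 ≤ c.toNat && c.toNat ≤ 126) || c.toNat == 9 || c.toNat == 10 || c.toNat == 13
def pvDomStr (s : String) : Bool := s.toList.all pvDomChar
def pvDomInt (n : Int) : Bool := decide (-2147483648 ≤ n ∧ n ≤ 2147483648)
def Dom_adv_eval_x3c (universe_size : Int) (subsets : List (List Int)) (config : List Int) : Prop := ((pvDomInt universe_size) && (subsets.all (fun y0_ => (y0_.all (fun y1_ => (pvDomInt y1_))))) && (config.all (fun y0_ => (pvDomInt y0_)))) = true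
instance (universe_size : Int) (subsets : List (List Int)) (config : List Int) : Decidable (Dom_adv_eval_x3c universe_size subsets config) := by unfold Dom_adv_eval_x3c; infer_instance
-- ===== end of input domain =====

-- B checks the solution element-centrically (every universe point lies in exactly one
-- chosen subset) instead of A's incremental covered-set loop (objective: alternative).

-- ===== PORT A =====
-- A's loop over the selected indices: covered grows, early False on overlap,
-- final comparison with set(range(universe_size)).
-- 'subsets[idx]' is guarded with getD [] only to make the port total; Pre_ excludes
-- the inputs where Python A would reach an out-of-range index.
def advLoopA (universe_size : Int) (subsets : List (List Int)) :
    List Int → PySem.Set Int → Bool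
  | [], covered => PySem.Set.equal covered (PySem.Set.ofList (PySem.List.pyRange 0 universe_size 1))
  | idx :: rest, covered =>
    let s : PySem.Set Int := PySem.Set.ofList ((PySem.List.pyGet? subsets idx).getD [])
    if (PySem.Set.inter s covered).isEmpty = false then false
    else advLoopA universe_size subsets rest (PySem.Set.union covered s)

def adv_eval_x3c (universe_size : Int) (subsets : List (List Int)) (config : List Int) : Bool :=
  let q := PySem.Int.floordiv universe_size 3
  let selected := ((PySem.List.enumerate config 0).filter (fun p => p.2 == 1)).map (fun p => p.1)
  if ((selected.length : Int) != q) = true then false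
  else advLoopA universe_size subsets selected PySem.Set.empty

-- ===== PORT B =====
-- B: count-of-ones check, zip subsets with config to collect the chosen subsets as
-- sets, reject any out-of-range element, then check each universe point is in
-- exactly one chosen set ('sum(e in s for s in chosen)' is List.countP).
def adv_eval_x3c_alt (universe_size : Int) (subsets : List (List Int)) (config : List Int) : Bool :=
  if ((config.countP (fun v => v == 1) : Int) != PySem.Int.floordiv universe_size 3) = true then false
  else
    let chosen : List (PySem.Set Int) :=
      ((subsets.zip config).filter (fun p => p.2 == 1)).map (fun p => PySem.Set.ofList p.1)
    if chosen.any (fun s => s.any (fun e => decide (e < 0) || decide (universe_size ≤ e))) then false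
    else (PySem.List.pyRange 0 universe_size 1).all
      (fun e => ((chosen.countP (fun s => PySem.Set.contains s e) : Int) == 1))

-- ===== PRECONDITION & SPEC =====
-- Pre_ excludes the inputs where the number of 1-entries in config equals
-- universe_size//3 but some 1-entry sits at an index ≥ len(subsets): there Python A
-- raises IndexError, except when an earlier overlap already returned False — and on
-- those B returns the same False (see the cite), so nothing A returns is contradicted.
def Pre_adv_eval_x3c (universe_size : Int) (subsets : List (List Int)) (config : List Int) : Prop :=
  ((config.countP (fun v => v == 1) : Int) = PySem.Int.floordiv universe_size 3) →
    ∀ i ∈ List.range config.length, config.getD i 0 = 1 → i < subsets.length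
instance (universe_size : Int) (subsets : List (List Int)) (config : List Int) : Decidable (Pre_adv_eval_x3c universe_size subsets config) := by unfold Pre_adv_eval_x3c; infer_instance

def pvWitness_adv_eval_x3c : Int × List (List Int) × List Int := (3, [[0, 1, 2]], [1])

def Spec_adv_eval_x3c (universe_size : Int) (subsets : List (List Int)) (config : List Int) (out : Bool) : Prop := out = adv_eval_x3c_alt universe_size subsets config
instance (universe_size : Int) (subsets : List (List Int)) (config : List Int) (out : Bool) : Decidable (Spec_adv_eval_x3c universe_size subsets config out) := by unfold Spec_adv_eval_x3c; infer_instance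

-- ===== CLAIM (what is proved, stated in full; the proofs are below) =====
def Claim_equal_adv_eval_x3c : Prop := ∀ (universe_size : Int) (subsets : List (List Int)) (config : List Int), Dom_adv_eval_x3c universe_size subsets config → Pre_adv_eval_x3c universe_size subsets config → Spec_adv_eval_x3c universe_size subsets config (adv_eval_x3c universe_size subsets config)

-- ===== LEMMAS AND PROOFS =====

-- discarding a non-member is the identity
theorem pv_discard_of_not_mem {s : PySem.Set Int} {x : Int}
    (hx : x ∉ s) : s.discard x = s := by
  unfold PySem.Set.discard
  exact List.filter_eq_self.mpr (by intro a ha; simp; rintro rfl; exact hx ha)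

-- discarding a member of a Nodup set drops exactly one element
theorem pv_length_discard_of_mem {s : PySem.Set Int} {x : Int}
    (hnd : s.Nodup) (hx : x ∈ s) : (s.discard x).length = s.length - 1 := by
  have h1 : s.discard x = s.erase x := by
    rw [hnd.erase_eq_filter]
    unfold PySem.Set.discard
    congr 1
  rw [h1, List.length_erase_of_mem hx]

-- |set(xs)| = |xs| iff xs has no duplicates
theorem pv_length_ofList_eq_iff (xs : List Int) :
    ((PySem.Set.ofList xs : PySem.Set Int).length = xs.length) ↔ xs.Nodup := by
  induction xs with
  | nil => simp [PySem.Set.ofList_nil]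
  | cons x xs ih =>
    rw [PySem.Set.ofList_cons]
    by_cases hx : x ∈ xs
    · have hmem : x ∈ (PySem.Set.ofList xs : PySem.Set Int) := by
        rw [PySem.Set.mem_ofList]; exact hx
      simp only [List.length_cons]
      rw [pv_length_discard_of_mem (PySem.Set.nodup_ofList xs) hmem]
      have hle := PySem.Set.length_ofList_le xs
      have hpos : 0 < (PySem.Set.ofList xs : PySem.Set Int).length :=
        List.length_pos_of_mem hmem
      constructor
      · intro h; omega
      · intro h
        exact absurd hx (by simp [List.nodup_cons] at h; exact h.1)
    · have hmem : x ∉ (PySem.Set.ofList xs : PySem.Set Int) := by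
        rw [PySem.Set.mem_ofList]; exact hx
      rw [pv_discard_of_not_mem hmem]
      simp [List.nodup_cons, hx, ih]

-- 'if s & covered:' truthiness: the intersection is nonempty iff the sets meet
theorem pv_inter_isEmpty (s t : PySem.Set Int) :
    (PySem.Set.inter s t).isEmpty = false ↔ ∃ x ∈ s, x ∈ t := by
  unfold PySem.Set.inter
  rw [List.isEmpty_eq_false_iff_exists_mem]
  constructor
  · rintro ⟨x, hx⟩
    simp at hx
    exact ⟨x, hx.1, hx.2⟩
  · rintro ⟨x, hs, ht⟩
    exact ⟨x, by simp [hs, ht]⟩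

-- the element list A implicitly aggregates over a selection
def pvElems (subsets : List (List Int)) (sel : List Int) : List Int :=
  sel.flatMap (fun idx => (PySem.Set.ofList ((PySem.List.pyGet? subsets idx).getD []) : PySem.Set Int))

-- A's loop, started at any Nodup covered, equals the aggregate check on covered ++ pvElems
theorem pv_loop_eq (universe_size : Int) (subsets : List (List Int)) :
    ∀ (sel : List Int) (covered : PySem.Set Int), covered.Nodup →
      advLoopA universe_size subsets sel covered =
        ((((PySem.Set.ofList (covered ++ pvElems subsets sel) : PySem.Set Int).length ==
            (covered ++ pvElems subsets sel).length))
          && PySem.Set.equal (PySem.Set.ofList (covered ++ pvElems subsets sel))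
               (PySem.Set.ofList (PySem.List.pyRange 0 universe_size 1))) := by
  intro sel
  induction sel with
  | nil =>
    intro covered hnd
    rw [advLoopA]
    simp [pvElems, PySem.Set.ofList_eq_self_of_nodup covered hnd]
  | cons idx rest ih =>
    intro covered hnd
    rw [advLoopA]
    set s : PySem.Set Int := PySem.Set.ofList ((PySem.List.pyGet? subsets idx).getD []) with hs
    have hsnd : s.Nodup := PySem.Set.nodup_ofList _
    have hE : pvElems subsets (idx :: rest) = s ++ pvElems subsets rest := by
      simp [pvElems, hs]
    by_cases hov : ∃ x ∈ s, x ∈ covered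
    · rw [if_pos ((pv_inter_isEmpty s covered).mpr hov)]
      obtain ⟨x, hxs, hxc⟩ := hov
      have hnod : ¬ (covered ++ pvElems subsets (idx :: rest)).Nodup := by
        rw [hE]
        intro h
        rw [List.nodup_append] at h
        exact h.2.2 x hxc x (by simp [hxs]) rfl
      have hne : ((((PySem.Set.ofList (covered ++ pvElems subsets (idx :: rest)) : PySem.Set Int).length ==
          (covered ++ pvElems subsets (idx :: rest)).length)) = false) := by
        rw [beq_eq_false_iff_ne]
        intro h
        exact hnod ((pv_length_ofList_eq_iff _).mp h)
      rw [hne, Bool.false_and]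
    · rw [if_neg (by rw [pv_inter_isEmpty]; exact hov)]
      push Not at hov
      have huni : PySem.Set.union covered s = covered ++ s :=
        PySem.Set.update_eq_append_of_disjoint covered s hsnd hov
      have hnd' : (covered ++ s).Nodup := by
        rw [List.nodup_append]
        refine ⟨hnd, hsnd, ?_⟩
        intro x hx y hy heq
        exact hov y hy (heq ▸ hx)
      rw [huni, ih (covered ++ s) hnd', hE, List.append_assoc]

-- length of the filtered enumeration = countP over the values
theorem pv_filter_enum_length (config : List Int) :
    ∀ k : Int, ((PySem.List.enumerate config k).filter (fun p => p.2 == 1)).length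
      = config.countP (fun v => v == 1) := by
  induction config with
  | nil => intro k; simp [PySem.List.enumerate_nil]
  | cons v rest ih =>
    intro k
    rw [PySem.List.enumerate_cons]
    by_cases hv : (v == 1) = true
    · simp [hv, ih (k + 1)]
    · simp [hv, ih (k + 1)]

-- selection alignment: indexing subsets at the selected positions = zip-filter
theorem pv_sel_zip (full : List (List Int)) :
    ∀ (config : List Int) (k : Nat),
      (∀ p ∈ (PySem.List.enumerate config (k : Int)).filter (fun p => p.2 == 1),
        p.1 < (full.length : Int)) →
      (((PySem.List.enumerate config (k : Int)).filter (fun p => p.2 == 1)).map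
          (fun p => (PySem.Set.ofList ((PySem.List.pyGet? full p.1).getD []) : PySem.Set Int)))
        = (((full.drop k).zip config).filter (fun p => p.2 == 1)).map
            (fun p => (PySem.Set.ofList p.1 : PySem.Set Int)) := by
  intro config
  induction config with
  | nil => intro k h; simp [PySem.List.enumerate_nil]
  | cons v rest ih =>
    intro k h
    rw [PySem.List.enumerate_cons] at h ⊢
    by_cases hk : k < full.length
    · have hdrop : full.drop k = full[k] :: full.drop (k + 1) :=
        List.drop_eq_getElem_cons hk
      rw [hdrop]
      by_cases hv : (v == 1) = true
      · rw [List.filter_cons_of_pos (by simpa using hv), List.zip_cons_cons,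
          List.filter_cons_of_pos (by simpa using hv)]
        simp only [List.map_cons]
        have hget : (PySem.List.pyGet? full ((k : Nat) : Int)).getD [] = full[k] := by
          rw [PySem.List.pyGet?_natCast]
          simp [List.getElem?_eq_getElem hk]
        rw [hget]
        have hrec := ih (k + 1) (by
          intro p hp
          apply h
          rw [List.filter_cons_of_pos (by simpa using hv)]
          simp only [List.mem_cons]
          right
          have : ((k : Int) + 1) = (((k + 1 : Nat)) : Int) := by push_cast; ring
          rw [this]
          exact hp)
        have hcast : ((k : Int) + 1) = (((k + 1 : Nat)) : Int) := by push_cast; ring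
        rw [hcast, hrec]
      · rw [List.filter_cons_of_neg (by simpa using hv), List.zip_cons_cons,
          List.filter_cons_of_neg (by simpa using hv)]
        have hrec := ih (k + 1) (by
          intro p hp
          apply h
          rw [List.filter_cons_of_neg (by simpa using hv)]
          have : ((k : Int) + 1) = (((k + 1 : Nat)) : Int) := by push_cast; ring
          rw [this]
          exact hp)
        have hcast : ((k : Int) + 1) = (((k + 1 : Nat)) : Int) := by push_cast; ring
        rw [hcast, hrec]
    · -- k ≥ full.length : both sides are empty
      have hdrop : full.drop k = [] := List.drop_eq_nil_of_le (by omega)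
      rw [hdrop]
      have hfe : (((k : Int), v) :: PySem.List.enumerate rest ((k : Int) + 1)).filter
          (fun p => p.2 == 1) = [] := by
        rw [List.filter_eq_nil_iff]
        intro p hp hv1
        have hlt := h p (List.mem_filter.mpr ⟨hp, hv1⟩)
        rcases List.mem_cons.mp hp with rfl | hp'
        · simp at hlt; omega
        · obtain ⟨j, hj, rfl⟩ := (PySem.List.mem_enumerate_iff _ _ _).mp hp'
          simp at hlt
          omega
      rw [hfe]
      simp

-- counting the chosen sets containing e = counting e in the concatenation
theorem pv_countP_flatten (e : Int) :
    ∀ (chosen : List (List Int)), (∀ s ∈ chosen, s.Nodup) →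
      chosen.countP (fun s => PySem.Set.contains s e) = chosen.flatten.count e := by
  intro chosen
  induction chosen with
  | nil => intro _; simp
  | cons s rest ih =>
    intro h
    have hnd : s.Nodup := h s (by simp)
    have hrec := ih (fun t ht => h t (by simp [ht]))
    rw [List.flatten_cons, List.count_append, List.countP_cons, hrec]
    by_cases he : e ∈ s
    · simp [he, List.count_eq_one_of_mem hnd he]
      omega
    · simp [he, List.count_eq_zero.mpr he]

-- the aggregate check = the element-centric check (all chosen sets Nodup)
theorem pv_agg_eq_elem (n : Int) (chosen : List (List Int))
    (hnd : ∀ s ∈ chosen, s.Nodup) :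
    ((((PySem.Set.ofList chosen.flatten : PySem.Set Int).length == chosen.flatten.length))
      && PySem.Set.equal (PySem.Set.ofList chosen.flatten)
           (PySem.Set.ofList (PySem.List.pyRange 0 n 1)))
    = (if chosen.any (fun s => s.any (fun e => decide (e < 0) || decide (n ≤ e))) then false
       else (PySem.List.pyRange 0 n 1).all
         (fun e => ((chosen.countP (fun s => PySem.Set.contains s e) : Int) == 1))) := by
  rw [Bool.eq_iff_iff]
  simp only [Bool.and_eq_true, beq_iff_eq]
  constructor
  · rintro ⟨hlen, hequal⟩
    have hnodup : chosen.flatten.Nodup := (pv_length_ofList_eq_iff _).mp hlen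
    have hmem : ∀ x : Int, x ∈ chosen.flatten ↔ (0 ≤ x ∧ x < n) := by
      intro x
      have hx := (PySem.Set.equal_iff _ _).mp hequal x
      rw [PySem.Set.mem_ofList, PySem.Set.mem_ofList, PySem.List.mem_pyRange_one] at hx
      exact hx
    have hoob : chosen.any (fun s => s.any (fun e => decide (e < 0) || decide (n ≤ e))) = false := by
      rw [Bool.eq_false_iff]
      intro hcc
      simp only [List.any_eq_true, Bool.or_eq_true, decide_eq_true_eq] at hcc
      obtain ⟨s, hs, e, he, hbad⟩ := hcc
      have : e ∈ chosen.flatten := List.mem_flatten.mpr ⟨s, hs, he⟩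
      have := (hmem e).mp this
      omega
    rw [hoob]
    simp only [Bool.false_eq_true, if_false, List.all_eq_true, beq_iff_eq]
    intro e he
    have hbounds := (PySem.List.mem_pyRange_one).mp he
    have hcnt : chosen.flatten.count e = 1 :=
      List.count_eq_one_of_mem hnodup ((hmem e).mpr ⟨hbounds.1, hbounds.2⟩)
    rw [pv_countP_flatten e chosen hnd, hcnt]
    rfl
  · intro hright
    by_cases hany : chosen.any (fun s => s.any (fun e => decide (e < 0) || decide (n ≤ e))) = true
    · rw [hany] at hright
      simp at hright
    · rw [if_neg (by simp [hany])] at hright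
      have hin : ∀ s ∈ chosen, ∀ e ∈ s, 0 ≤ e ∧ e < n := by
        intro s hs e he
        by_contra hc
        exact hany (by
          simp only [List.any_eq_true, Bool.or_eq_true, decide_eq_true_eq]
          exact ⟨s, hs, e, he, by omega⟩)
      have hcnt : ∀ e : Int, 0 ≤ e → e < n → chosen.flatten.count e = 1 := by
        intro e h0 h1
        have := (List.all_eq_true.mp hright e
          ((PySem.List.mem_pyRange_one).mpr ⟨h0, h1⟩))
        rw [beq_iff_eq, ← pv_countP_flatten e chosen hnd] at *
        exact_mod_cast this
      have hmemflat : ∀ x ∈ chosen.flatten, 0 ≤ x ∧ x < n := by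
        intro x hx
        obtain ⟨s, hs, hxs⟩ := List.mem_flatten.mp hx
        exact hin s hs x hxs
      have hnodup : chosen.flatten.Nodup := by
        rw [List.nodup_iff_count_le_one]
        intro a
        by_cases ha : a ∈ chosen.flatten
        · have := hmemflat a ha
          rw [hcnt a this.1 this.2]
        · rw [List.count_eq_zero.mpr ha]
          omega
      refine ⟨(pv_length_ofList_eq_iff _).mpr hnodup, ?_⟩
      rw [PySem.Set.equal_iff]
      intro x
      rw [PySem.Set.mem_ofList, PySem.Set.mem_ofList, PySem.List.mem_pyRange_one]
      constructor
      · exact fun hx => hmemflat x hx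
      · intro hx
        have := hcnt x hx.1 hx.2
        rw [← List.count_pos_iff]
        omega

-- ===== VERDICT (by name: the statement is the Claim_ definition above) =====
theorem adv_eval_x3c_spec : Claim_equal_adv_eval_x3c := by
  intro n subsets config _ hpre
  unfold Spec_adv_eval_x3c adv_eval_x3c adv_eval_x3c_alt
  simp only []
  have hsl : ((((PySem.List.enumerate config 0).filter (fun p => p.2 == 1)).map
      (fun p => p.1)).length : Int) = (config.countP (fun v => v == 1) : Int) := by
    rw [List.length_map, pv_filter_enum_length config 0]
  rw [hsl]
  by_cases hC : (((config.countP (fun v => v == 1) : Int)) != PySem.Int.floordiv n 3) = true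
  · rw [if_pos hC, if_pos hC]
  · rw [if_neg hC, if_neg hC]
    have hq : (config.countP (fun v => v == 1) : Int) = PySem.Int.floordiv n 3 := by
      simpa using hC
    have hidx := hpre hq
    have hhyp : ∀ p ∈ (PySem.List.enumerate config ((0 : Nat) : Int)).filter
        (fun p => p.2 == 1), p.1 < ((subsets.length : Nat) : Int) := by
      intro p hp
      obtain ⟨hpm, hpv⟩ := List.mem_filter.mp hp
      obtain ⟨k, hk, rfl⟩ := (PySem.List.mem_enumerate_iff _ _ _).mp hpm
      have hcfg : config.getD k 0 = 1 := by
        rw [List.getD_eq_getElem config 0 hk]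
        simpa using hpv
      have := hidx k (List.mem_range.mpr hk) hcfg
      simp
      omega
    have hzip := pv_sel_zip subsets config 0 hhyp
    rw [List.drop_zero, Nat.cast_zero] at hzip
    have hElems : pvElems subsets
        (((PySem.List.enumerate config 0).filter (fun p => p.2 == 1)).map (fun p => p.1))
        = (((subsets.zip config).filter (fun p => p.2 == 1)).map
            (fun p => (PySem.Set.ofList p.1 : PySem.Set Int))).flatten := by
      unfold pvElems
      rw [List.flatMap_def, List.map_map]
      congr 1
    rw [pv_loop_eq n subsets _ PySem.Set.empty (by simp [PySem.Set.empty])]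
    have hemp : (PySem.Set.empty : PySem.Set Int) ++ pvElems subsets
        (((PySem.List.enumerate config 0).filter (fun p => p.2 == 1)).map (fun p => p.1))
        = pvElems subsets
        (((PySem.List.enumerate config 0).filter (fun p => p.2 == 1)).map (fun p => p.1)) := by
      simp [PySem.Set.empty]
    rw [hemp, hElems]
    exact pv_agg_eq_elem n _ (by
      intro s hs
      obtain ⟨p, _, rfl⟩ := List.mem_map.mp hs
      exact PySem.Set.nodup_ofList _)
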